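-- pv_equiv track=rewrite | github.com/sonneveld/advent-of-code | advent17/17/solution.py | generator_slow
-- ===== SOURCE A (Python) =====
-- def generator_slow(data, last_v = 50_000_000):
--
--     buf = [0]
--     skip_size = data
--     i = 0
--     v = 1
--
--     while True:
--         i = (i + skip_size) % len(buf)
--
--         if buf[i] == 0:
--             yield v
--
--         buf.insert(i+1, v)
--
--         if v == last_v:
--             break
--
--         v += 1
--         i = i+1
-- ===== SOURCE B (Python) =====
-- def generator_slow(data, last_v=50_000_000):
--     # O(n): the buffer is never inspected except for "is the element 0", and 0
--     # stays at index 0 forever (every insertion lands at index >= 1); moreover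
--     # the buffer length at the step handling value v is exactly v.  So a plain
--     # for-loop over v suffices, with only the insertion cursor as state.
--     i = 0
--     for v in range(1, last_v + 1):
--         i = (i + data) % v
--         if i == 0:
--             yield v
--         i += 1
-- ===== Notes on version B (the rewrite author's own statement) =====
-- stated objective: faster
-- what changed: B drops the buffer and the while/break loop entirely: since 0 never moves from index 0 and the buffer length at the step for value v is exactly v, B is a for-loop over v in range(1, last_v+1) keeping only the cursor i, yielding v when (i+data)%v == 0; the O(n^2) list-insert simulation becomes an O(n) arithmetic scan.
import Mathlib
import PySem

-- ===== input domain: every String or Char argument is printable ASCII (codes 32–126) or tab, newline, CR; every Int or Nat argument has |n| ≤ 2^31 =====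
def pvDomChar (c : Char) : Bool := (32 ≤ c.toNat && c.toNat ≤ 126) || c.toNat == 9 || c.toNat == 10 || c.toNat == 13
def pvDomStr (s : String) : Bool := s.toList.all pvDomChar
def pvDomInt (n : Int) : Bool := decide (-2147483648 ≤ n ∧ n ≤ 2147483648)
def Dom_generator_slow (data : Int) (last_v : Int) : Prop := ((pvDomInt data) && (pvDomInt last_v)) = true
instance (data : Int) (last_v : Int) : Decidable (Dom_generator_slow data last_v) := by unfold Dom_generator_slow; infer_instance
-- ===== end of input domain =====

-- B replaces A's quadratic buffer-insert simulation by an O(n) for-loop over the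
-- yielded values (a fold over range(1, last_v+1) keeping only the cursor).
-- Equivalence is about the list of yielded values (the Python functions are generators).

-- ===== PORT A =====
-- A's while loop: one iteration per value v, so last_v.toNat is sufficient fuel
-- (fuel is only a totality device; for last_v < 1 the Python loop never terminates
-- and both ports return [], so nothing is claimed about Python there).  buf[i] is
-- always in range (0 ≤ i % len < len), so pyGetD's default 1 (≠ 0, like Python's
-- IndexError branch, which never fires) is never used.
def genA_loop (data last_v : Int) (fuel : Nat) (buf : List Int) (i v : Int)
    (acc : List Int) : List Int :=
  match fuel with
  | 0 => acc.reverse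
  | fuel + 1 =>
    let i' := PySem.Int.mod (i + data) (buf.length : Int)
    let acc' := if PySem.List.pyGetD buf i' 1 = 0 then v :: acc else acc
    let buf' := PySem.List.insert buf (i' + 1) v
    if v = last_v then acc'.reverse
    else genA_loop data last_v fuel buf' (i' + 1) (v + 1) acc'

def generator_slow (data : Int) (last_v : Int) : List Int :=
  genA_loop data last_v last_v.toNat [0] 0 1 []

-- ===== PORT B =====
-- Source B's for-loop over range(1, last_v+1) as a fold; the state is just (i, yielded).
def genB_step (data : Int) (st : Int × List Int) (v : Int) : Int × List Int :=
  let i := PySem.Int.mod (st.1 + data) v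
  (i + 1, if i = 0 then v :: st.2 else st.2)

def generator_slow_alt (data : Int) (last_v : Int) : List Int :=
  ((PySem.List.pyRange 1 (last_v + 1) 1).foldl (genB_step data) (0, [])).2.reverse

-- ===== PRECONDITION & SPEC =====
def Spec_generator_slow (data : Int) (last_v : Int) (out : List Int) : Prop := out = generator_slow_alt data last_v
instance (data : Int) (last_v : Int) (out : List Int) : Decidable (Spec_generator_slow data last_v out) := by unfold Spec_generator_slow; infer_instance

-- ===== CLAIM (what is proved, stated in full; the proofs are below) =====
def Claim_equal_generator_slow : Prop := ∀ (data : Int) (last_v : Int), Dom_generator_slow data last_v → Spec_generator_slow data last_v (generator_slow data last_v)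

-- ===== LEMMAS AND PROOFS =====

theorem mod_bounds (a b : Int) (hb : 0 < b) :
    0 ≤ PySem.Int.mod a b ∧ PySem.Int.mod a b < b := by
  rw [PySem.Int.mod_eq_emod_of_pos hb]
  exact ⟨Int.emod_nonneg a (by omega), Int.emod_lt_of_pos a hb⟩

-- Invariant connecting A's state to B's fold: buf = 0 :: rest with every element
-- of rest nonzero, buf's length is v (the value about to be handled), and fuel
-- (last_v + 1 - v).toNat suffices for the remaining iterations.
theorem loop_eq (data last_v : Int) (fuel : Nat) :
    ∀ (rest : List Int) (i v : Int) (acc : List Int),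
      (∀ x ∈ rest, x ≠ 0) → 1 ≤ v → (rest.length : Int) + 1 = v →
      fuel = (last_v + 1 - v).toNat →
      genA_loop data last_v fuel (0 :: rest) i v acc
        = ((PySem.List.pyRange v (last_v + 1) 1).foldl (genB_step data) (i, acc)).2.reverse := by
  induction fuel with
  | zero =>
    intro rest i v acc _ _ _ hfuel
    have hba : last_v + 1 ≤ v := by omega
    rw [PySem.List.pyRange_one_eq_nil hba]
    rfl
  | succ fuel ih =>
    intro rest i v acc hrest hv hlen hfuel
    have hvb : v < last_v + 1 := by omega
    rw [PySem.List.pyRange_one_cons hvb]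
    simp only [genA_loop, List.foldl_cons]
    have hlenbuf : (((0 :: rest : List Int).length : Int)) = v := by
      simpa using hlen
    set m := PySem.Int.mod (i + data) v with hm
    obtain ⟨hm0, hmlt⟩ := mod_bounds (i + data) v (by omega)
    rw [← hm] at hm0 hmlt
    have hmlt' : m.toNat < (0 :: rest : List Int).length := by
      simp only [List.length_cons]; omega
    have hget : PySem.List.pyGetD (0 :: rest) m 1 = (0 :: rest)[m.toNat]'hmlt' := by
      exact PySem.List.pyGetD_eq_getElem _ 1 hm0 (by rw [hlenbuf]; exact hmlt)
    have hiff : ((0 :: rest : List Int)[m.toNat]'hmlt' = 0) ↔ m = 0 := by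
      rcases Nat.eq_zero_or_pos m.toNat with h0 | hp
      · simp [h0]; omega
      · obtain ⟨k, hk⟩ : ∃ k, m.toNat = k + 1 := ⟨m.toNat - 1, by omega⟩
        have hk2 : k < rest.length := by
          simp only [List.length_cons] at hmlt'; omega
        have hel : (0 :: rest : List Int)[m.toNat]'hmlt' = rest[k]'hk2 := by simp [hk]
        rw [hel]
        constructor
        · intro hc; exact absurd hc (hrest _ (List.getElem_mem hk2))
        · intro hc; omega
    have hins : PySem.List.insert (0 :: rest) (m + 1) v
        = 0 :: (rest.take m.toNat ++ v :: rest.drop m.toNat) := by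
      have hcast : m + 1 = ((m.toNat + 1 : Nat) : Int) := by omega
      rw [hcast, PySem.List.insert_natCast _ _ _ (by simp only [List.length_cons]; omega)]
      simp
    have hrest' : ∀ x ∈ rest.take m.toNat ++ v :: rest.drop m.toNat, x ≠ 0 := by
      intro x hx
      rcases List.mem_append.1 hx with h | h
      · exact hrest _ (List.mem_of_mem_take h)
      · rcases List.mem_cons.1 h with h | h
        · omega
        · exact hrest _ (List.mem_of_mem_drop h)
    have hlen' : ((rest.take m.toNat ++ v :: rest.drop m.toNat).length : Int) + 1 = v + 1 := by
      simp only [List.length_append, List.length_cons, List.length_take, List.length_drop]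
      push_cast; omega
    rw [hlenbuf, hget, hins]
    simp only [hiff, genB_step, ← hm]
    by_cases hvl : v = last_v
    · have : last_v + 1 ≤ v + 1 := by omega
      rw [if_pos hvl, PySem.List.pyRange_one_eq_nil this, List.foldl_nil]
    · rw [if_neg hvl,
        ih _ _ _ _ hrest' (by omega) hlen' (by omega)]

-- ===== VERDICT (by name: the statement is the Claim_ definition above) =====
theorem generator_slow_spec : Claim_equal_generator_slow := by
  intro data last_v _
  unfold Spec_generator_slow generator_slow generator_slow_alt
  rw [loop_eq data last_v last_v.toNat [] 0 1 [] (by simp) (by omega) (by simp) (by omega)]
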